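-- pv_equiv track=rewrite | github.com/rayfengfirst-netizen/amazon-us-scraper | webapp/services/payload_view.py | _pick_rating_reviews
-- ===== SOURCE A (Python) =====
-- def _last_segment(path: str) -> str:
--     if not path:
--         return ""
--     tail = path.split(".")[-1]
--     return tail.split("[")[0].lower().replace("-", "_")
--
-- def _pick_rating_reviews(leaves: list[tuple[str, str]]) -> tuple[str | None, str | None]:
--     rating = None
--     reviews = None
--     for path, val in leaves:
--         lk = _last_segment(path)
--         if rating is None and lk in ("rating", "stars", "star_rating", "average_rating"):
--             if len(val) < 32:
--                 rating = val
--         if reviews is None and any(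
--             x in lk for x in ("review_count", "reviews_count", "ratings_total", "num_ratings", "total_reviews")
--         ):
--             if len(val) < 32:
--                 reviews = val
--     return rating, reviews
-- ===== SOURCE B (Python) =====
-- # B: two independent early-terminating scans (one per output) instead of A's single
-- # interleaved loop with two optional slots; same first-match-under-32-chars semantics.
--
-- def _last_segment(path: str) -> str:
--     if not path:
--         return ""
--     tail = path.split(".")[-1]
--     return tail.split("[")[0].lower().replace("-", "_")
--
-- _RATING_KEYS = ("rating", "stars", "star_rating", "average_rating")
-- _REVIEW_SUBS = ("review_count", "reviews_count", "ratings_total", "num_ratings", "total_reviews")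
--
-- def _pick_rating_reviews(leaves: list[tuple[str, str]]) -> tuple[str | None, str | None]:
--     rating = next((val for path, val in leaves
--                    if len(val) < 32 and _last_segment(path) in _RATING_KEYS), None)
--     reviews = next((val for path, val in leaves
--                     if len(val) < 32 and any(x in _last_segment(path) for x in _REVIEW_SUBS)), None)
--     return rating, reviews
-- ===== Notes on version B (the rewrite author's own statement) =====
-- stated objective: simpler
-- what changed: Replaces the single interleaved loop that threads two mutable optional slots with two independent early-terminating next(...) scans, one per output.
import Mathlib
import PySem

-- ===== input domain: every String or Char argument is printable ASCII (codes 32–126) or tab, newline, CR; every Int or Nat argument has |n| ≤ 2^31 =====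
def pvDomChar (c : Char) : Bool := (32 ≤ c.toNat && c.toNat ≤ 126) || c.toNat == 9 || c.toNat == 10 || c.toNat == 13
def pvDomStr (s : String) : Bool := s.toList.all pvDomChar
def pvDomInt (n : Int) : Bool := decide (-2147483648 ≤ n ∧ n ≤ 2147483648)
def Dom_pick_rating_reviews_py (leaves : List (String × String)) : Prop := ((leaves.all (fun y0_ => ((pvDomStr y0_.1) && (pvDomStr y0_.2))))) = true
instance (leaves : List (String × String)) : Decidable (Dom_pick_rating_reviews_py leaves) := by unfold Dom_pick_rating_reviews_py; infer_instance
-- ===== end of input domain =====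

-- B replaces A's single interleaved loop (two mutable optional slots) with two
-- independent early-terminating scans, one per output (objective: simpler).

-- ===== PORT A =====
-- helper shared by both Python versions: _last_segment
def pv_last_segment (path : String) : String :=
  if path = "" then ""
  else
    -- path.split(".")[-1]: split? with sep "." is always `some` (sep ≠ ""), and the
    -- result is never empty, so [-1] never raises; getLastD "" is exact here
    let tail := ((PySem.Str.split? path ".").getD []).getLastD ""
    -- tail.split("[")[0]: likewise non-empty, headD "" is exact
    let head := ((PySem.Str.split? tail "[").getD []).headD ""
    PySem.Str.replace (PySem.Str.lower head) "-" "_"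

-- the body of A's for-loop, step for step
def pvStepA (st : Option String × Option String) (pv : String × String) :
    Option String × Option String :=
  let lk := pv_last_segment pv.1
  let st1 :=
    if st.1 = none ∧ (lk = "rating" ∨ lk = "stars" ∨ lk = "star_rating" ∨ lk = "average_rating") then
      if PySem.Str.len pv.2 < 32 then (some pv.2, st.2) else st
    else st
  if st1.2 = none ∧ (PySem.Str.isIn "review_count" lk = true ∨ PySem.Str.isIn "reviews_count" lk = true ∨
      PySem.Str.isIn "ratings_total" lk = true ∨ PySem.Str.isIn "num_ratings" lk = true ∨
      PySem.Str.isIn "total_reviews" lk = true) then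
    if PySem.Str.len pv.2 < 32 then (st1.1, some pv.2) else st1
  else st1

def pick_rating_reviews_py (leaves : List (String × String)) : Option String × Option String :=
  leaves.foldl pvStepA (none, none)

-- ===== PORT B =====
def pvRatingKey (lk : String) : Bool :=
  lk == "rating" || lk == "stars" || lk == "star_rating" || lk == "average_rating"

def pvReviewKey (lk : String) : Bool :=
  PySem.Str.isIn "review_count" lk || PySem.Str.isIn "reviews_count" lk ||
  PySem.Str.isIn "ratings_total" lk || PySem.Str.isIn "num_ratings" lk ||
  PySem.Str.isIn "total_reviews" lk

-- next((val for path, val in leaves if p (path, val)), None)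
def pv_first_match (p : String × String → Bool) : List (String × String) → Option String
  | [] => none
  | x :: xs => if p x then some x.2 else pv_first_match p xs

def pick_rating_reviews_py_alt (leaves : List (String × String)) : Option String × Option String :=
  (pv_first_match (fun pv => decide (PySem.Str.len pv.2 < 32) && pvRatingKey (pv_last_segment pv.1)) leaves,
   pv_first_match (fun pv => decide (PySem.Str.len pv.2 < 32) && pvReviewKey (pv_last_segment pv.1)) leaves)

-- ===== PRECONDITION & SPEC =====
def Spec_pick_rating_reviews_py (leaves : List (String × String)) (out : Option String × Option String) : Prop := out = pick_rating_reviews_py_alt leaves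
instance (leaves : List (String × String)) (out : Option String × Option String) : Decidable (Spec_pick_rating_reviews_py leaves out) := by unfold Spec_pick_rating_reviews_py; infer_instance

-- ===== CLAIM (what is proved, stated in full; the proofs are below) =====
def Claim_equal_pick_rating_reviews_py : Prop := ∀ (leaves : List (String × String)), Dom_pick_rating_reviews_py leaves → Spec_pick_rating_reviews_py leaves (pick_rating_reviews_py leaves)

-- ===== LEMMAS AND PROOFS =====

-- loop invariant: folding A's step from any accumulator fills each still-empty slot
-- with the first match of the corresponding B-predicate
theorem pvFoldA_eq (leaves : List (String × String)) :
    ∀ r v : Option String,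
      leaves.foldl pvStepA (r, v) =
        ((r.or (pv_first_match (fun pv => decide (PySem.Str.len pv.2 < 32) && pvRatingKey (pv_last_segment pv.1)) leaves)),
         (v.or (pv_first_match (fun pv => decide (PySem.Str.len pv.2 < 32) && pvReviewKey (pv_last_segment pv.1)) leaves))) := by
  induction leaves with
  | nil => intro r v; cases r <;> cases v <;> simp [pv_first_match]
  | cons x xs ih =>
    intro r v
    simp only [List.foldl_cons]
    have hstep : pvStepA (r, v) x =
        ((if r = none ∧ (decide (PySem.Str.len x.2 < 32) && pvRatingKey (pv_last_segment x.1)) = true then some x.2 else r),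
         (if v = none ∧ (decide (PySem.Str.len x.2 < 32) && pvReviewKey (pv_last_segment x.1)) = true then some x.2 else v)) := by
      simp only [pvStepA, pvRatingKey, pvReviewKey]
      cases r <;> cases v <;>
        simp <;> split_ifs <;> simp_all <;> tauto
    rw [hstep, ih]
    clear ih hstep
    cases r <;> cases v <;>
      simp only [pv_first_match, Option.some_or, Option.none_or] <;> split_ifs <;> simp_all

-- ===== VERDICT (by name: the statement is the Claim_ definition above) =====
theorem pick_rating_reviews_py_spec : Claim_equal_pick_rating_reviews_py := by
  intro leaves _
  unfold Spec_pick_rating_reviews_py pick_rating_reviews_py pick_rating_reviews_py_alt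
  rw [pvFoldA_eq]
  simp
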